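-- pv_equiv track=rewrite | github.com/mchu-1/DNA-evolver | evolve_strings.py | remove_terminators
-- ===== SOURCE A (Python) =====
-- def remove_terminators(sequence: str) -> str:
--     """
--     Remove terminator from a given sequence.
--     """
--     count = 0
--     new_bases = []
--     for base in sequence:
--         if base == "T":
--             count += 1
--         if count == 4:
--             new_bases.append("A") # flip fourth T
--             count = 0 # reset count
--         else:
--             new_bases.append(base)
--
--     new_sequence = "".join(new_bases)
--
--     return new_sequence
-- ===== SOURCE B (Python) =====
-- def remove_terminators(sequence: str) -> str:
--     # Two-pass: gather T positions, then flip every 4th one (T-indices 3, 7, 11, ...).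
--     ts = [i for i, b in enumerate(sequence) if b == "T"]
--     result = list(sequence)
--     for k in range(3, len(ts), 4):
--         result[ts[k]] = "A"
--     return "".join(result)
-- ===== Notes on version B (the rewrite author's own statement) =====
-- stated objective: alternative
-- what changed: Replaces A's fused loop with a running reset-at-4 T-counter by a two-pass decomposition: first collect the indices of every 'T', then overwrite exactly the positions at T-indices 3, 7, 11, ... with 'A' in a copy of the sequence.
import Mathlib
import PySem

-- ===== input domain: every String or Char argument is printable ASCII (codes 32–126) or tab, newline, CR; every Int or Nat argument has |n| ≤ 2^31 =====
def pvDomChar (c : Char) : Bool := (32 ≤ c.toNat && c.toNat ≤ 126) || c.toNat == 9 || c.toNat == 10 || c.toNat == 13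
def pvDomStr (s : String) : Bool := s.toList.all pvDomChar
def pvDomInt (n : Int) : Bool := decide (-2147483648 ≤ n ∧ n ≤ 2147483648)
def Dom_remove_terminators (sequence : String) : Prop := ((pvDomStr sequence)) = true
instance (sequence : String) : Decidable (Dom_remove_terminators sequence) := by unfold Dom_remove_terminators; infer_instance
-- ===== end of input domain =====

-- B replaces A's fused count-and-append loop by a two-pass decomposition (gather T positions,
-- then overwrite every 4th one); same O(n) cost, objective: alternative.

-- ===== PORT A =====
-- one fused loop: a running T-counter, reset at 4, appending either 'A' or the base
def remove_terminators (sequence : String) : String :=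
  let st := sequence.toList.foldl
    (fun (s : Int × List Char) base =>
      let count := if base = 'T' then s.1 + 1 else s.1
      if count = 4 then ((0 : Int), s.2 ++ ['A'])
      else (count, s.2 ++ [base]))
    ((0 : Int), ([] : List Char))
  String.mk st.2

-- ===== PORT B =====
-- two passes: ts = [i for i, b in enumerate(sequence) if b == "T"]; then
-- for k in range(3, len(ts), 4): result[ts[k]] = "A"  (ts[k] is always a valid index,
-- so the pyGetD/pySetD defaults are never used)
def remove_terminators_alt (sequence : String) : String :=
  let cs := sequence.toList
  let ts : List Int := (PySem.List.enumerate cs 0).filterMap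
    (fun p => if p.2 = 'T' then some p.1 else none)
  let result := (PySem.List.pyRange 3 (ts.length : Int) 4).foldl
    (fun r k => PySem.List.pySetD r (PySem.List.pyGetD ts k 0) 'A') cs
  String.mk result

-- ===== PRECONDITION & SPEC =====
def Spec_remove_terminators (sequence : String) (out : String) : Prop := out = remove_terminators_alt sequence
instance (sequence : String) (out : String) : Decidable (Spec_remove_terminators sequence out) := by unfold Spec_remove_terminators; infer_instance

-- ===== CLAIM (what is proved, stated in full; the proofs are below) =====
def Claim_equal_remove_terminators : Prop := ∀ (sequence : String), Dom_remove_terminators sequence → Spec_remove_terminators sequence (remove_terminators sequence)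

-- ===== LEMMAS AND PROOFS =====

/-- Number of `'T'` in a list of chars. -/
def pvCntT (l : List Char) : Nat := l.countP (· = 'T')

/-- Recursive description of A's loop (counter `c`, result built front-first). -/
def pvGoA : List Char → Int → List Char
  | [], _ => []
  | b :: bs, c =>
    let c' := if b = 'T' then c + 1 else c
    if c' = 4 then 'A' :: pvGoA bs 0 else b :: pvGoA bs c'

/-- Positions of `'T'` as ascending naturals. -/
def pvTpos : List Char → List Nat
  | [] => []
  | b :: bs => (if b = 'T' then [0] else []) ++ (pvTpos bs).map (· + 1)

lemma pvA_fold (cs : List Char) (c : Int) (acc : List Char) :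
    (cs.foldl
      (fun (s : Int × List Char) base =>
        let count := if base = 'T' then s.1 + 1 else s.1
        if count = 4 then ((0 : Int), s.2 ++ ['A'])
        else (count, s.2 ++ [base]))
      (c, acc)).2 = acc ++ pvGoA cs c := by
  induction cs generalizing c acc with
  | nil => simp [pvGoA]
  | cons b bs ih =>
    by_cases hb : b = 'T'
    · by_cases h4 : c + 1 = 4 <;>
        simp [pvGoA, hb, h4, ih]
    · by_cases h4 : c = 4 <;>
        simp [pvGoA, hb, h4, ih]

lemma pvGoA_cons_T_flip (bs : List Char) : pvGoA ('T' :: bs) 3 = 'A' :: pvGoA bs 0 := by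
  simp [pvGoA]

lemma pvGoA_cons_T (bs : List Char) (c : Int) (h : c + 1 ≠ 4) :
    pvGoA ('T' :: bs) c = 'T' :: pvGoA bs (c + 1) := by
  simp [pvGoA, h]

lemma pvGoA_cons_not (b : Char) (bs : List Char) (c : Int) (hb : b ≠ 'T') (h : c ≠ 4) :
    pvGoA (b :: bs) c = b :: pvGoA bs c := by
  simp [pvGoA, hb, h]

lemma pvGoA_getElem? (cs : List Char) (c : Nat) (hc : c < 4) (j : Nat) :
    (pvGoA cs (c : Int))[j]? =
      cs[j]?.map (fun x => if x = 'T' ∧ (c + pvCntT (cs.take j)) % 4 = 3 then 'A' else x) := by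
  induction cs generalizing c j with
  | nil => simp [pvGoA]
  | cons b bs ih =>
    have hcnt : ∀ l, pvCntT (b :: l) = (if b = 'T' then 1 else 0) + pvCntT l := by
      intro l; by_cases hbT : b = 'T' <;> simp [pvCntT, hbT]; omega
    by_cases hb : b = 'T'
    · subst hb
      by_cases h3 : c = 3
      · subst h3
        have hflip : ((3 : Nat) : Int) = (3 : Int) := by norm_num
        rw [hflip, pvGoA_cons_T_flip]
        cases j with
        | zero => simp [pvCntT]
        | succ j =>
          have h := ih 0 (by omega) j
          simp only [Nat.cast_zero] at h
          rw [List.getElem?_cons_succ, List.getElem?_cons_succ, h, List.take_succ_cons]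
          cases hx : bs[j]? with
          | none => rfl
          | some x =>
            simp only [Option.map_some]
            refine congrArg some (if_congr (and_congr_right fun _ => ?_) rfl rfl)
            rw [hcnt]; simp; omega
      · have hne : (c : Int) + 1 ≠ 4 := by omega
        rw [pvGoA_cons_T _ _ hne]
        cases j with
        | zero => simp [pvCntT]; omega
        | succ j =>
          have h := ih (c + 1) (by omega) j
          push_cast at h
          rw [List.getElem?_cons_succ, List.getElem?_cons_succ, h, List.take_succ_cons]
          cases hx : bs[j]? with
          | none => rfl
          | some x =>
            simp only [Option.map_some]
            refine congrArg some (if_congr (and_congr_right fun _ => ?_) rfl rfl)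
            rw [hcnt]; simp; omega
    · have hne : (c : Int) ≠ 4 := by omega
      rw [pvGoA_cons_not _ _ _ hb hne]
      cases j with
      | zero => simp [hb]
      | succ j =>
        have h := ih c hc j
        rw [List.getElem?_cons_succ, List.getElem?_cons_succ, h, List.take_succ_cons]
        cases hx : bs[j]? with
        | none => rfl
        | some x =>
          simp only [Option.map_some]
          refine congrArg some (if_congr (and_congr_right fun _ => ?_) rfl rfl)
          rw [hcnt]; simp [hb]

lemma pvFoldSet_getElem? (l : List Nat) (cs : List Char) (j : Nat) :
    (l.foldl (fun r i => r.set i 'A') cs)[j]? =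
      if j ∈ l then cs[j]?.map (fun _ => 'A') else cs[j]? := by
  induction l generalizing cs with
  | nil => simp
  | cons i l ih =>
    simp only [List.foldl_cons, ih, List.mem_cons]
    by_cases hij : j = i
    · subst hij
      by_cases hj : j ∈ l <;> simp [hj, List.getElem?_set] <;>
        · split_ifs with h
          · simp [List.getElem?_eq_getElem h]
          · simp [List.getElem?_eq_none (le_of_not_gt h)]
    · have hij' : ¬ i = j := fun h => hij h.symm
      by_cases hj : j ∈ l <;>
        simp [hj, hij, hij']

lemma pvTpos_getElem? (cs : List Char) (k j : Nat) :
    (pvTpos cs)[k]? = some j ↔ (cs[j]? = some 'T' ∧ pvCntT (cs.take j) = k) := by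
  induction cs generalizing k j with
  | nil => simp [pvTpos]
  | cons b bs ih =>
    by_cases hb : b = 'T'
    · subst hb
      have hrep : pvTpos ('T' :: bs) = 0 :: (pvTpos bs).map (· + 1) := by simp [pvTpos]
      have hcntT : ∀ l, pvCntT ('T' :: l) = pvCntT l + 1 := by
        intro l; simp [pvCntT]
      cases k with
      | zero =>
        cases j with
        | zero => simp [hrep, pvCntT]
        | succ j =>
          rw [hrep]
          simp only [List.getElem?_cons_zero, List.take_succ_cons]
          rw [hcntT]
          simp
      | succ k =>
        cases j with
        | zero =>
          rw [hrep]
          simp only [List.getElem?_cons_succ, List.getElem?_cons_zero, List.getElem?_map,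
            List.take_zero]
          simp [pvCntT]
        | succ j =>
          rw [hrep]
          simp only [List.getElem?_cons_succ, List.getElem?_map, List.take_succ_cons]
          rw [hcntT]
          constructor
          · intro h
            obtain ⟨a, ha, hav⟩ := Option.map_eq_some_iff.1 h
            have haj : a = j := by simp at hav; omega
            obtain ⟨hT2, hc2⟩ := (ih k j).1 (haj ▸ ha)
            exact ⟨hT2, by omega⟩
          · rintro ⟨hT, hc⟩
            have h2 : (pvTpos bs)[k]? = some j := (ih k j).2 ⟨hT, by omega⟩
            rw [h2]
            simp
    · have hrep : pvTpos (b :: bs) = (pvTpos bs).map (· + 1) := by simp [pvTpos, hb]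
      cases j with
      | zero =>
        rw [hrep]
        simp only [List.getElem?_map, List.getElem?_cons_zero, List.take_zero]
        simp [pvCntT, hb]
      | succ j =>
        rw [hrep]
        have hcntN : ∀ l, pvCntT (b :: l) = pvCntT l := by
          intro l; simp [pvCntT, hb]
        simp only [List.getElem?_map, List.getElem?_cons_succ, List.take_succ_cons]
        rw [hcntN]
        constructor
        · intro h
          obtain ⟨a, ha, hav⟩ := Option.map_eq_some_iff.1 h
          have haj : a = j := by simp at hav; omega
          exact (ih k j).1 (haj ▸ ha)
        · intro h
          rw [(ih k j).2 h]
          simp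

lemma pvTs_eq' (cs : List Char) (s : Int) :
    (PySem.List.enumerate cs s).filterMap (fun p => if p.2 = 'T' then some p.1 else none)
      = (pvTpos cs).map (fun (n : Nat) => (n : Int) + s) := by
  induction cs generalizing s with
  | nil => simp [PySem.List.enumerate_nil, pvTpos]
  | cons b bs ih =>
    rw [PySem.List.enumerate_cons]
    simp only [List.filterMap_cons]
    rw [ih (s + 1)]
    by_cases hb : b = 'T'
    · simp [hb, pvTpos, List.map_map]
      intro a _
      ring
    · simp [hb, pvTpos, List.map_map]
      intro a _
      ring

lemma pvTs_eq (cs : List Char) :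
    (PySem.List.enumerate cs 0).filterMap (fun p => if p.2 = 'T' then some p.1 else none)
      = (pvTpos cs).map (fun (n : Nat) => (n : Int)) := by
  rw [pvTs_eq' cs 0]
  apply List.map_congr_left
  intro x _
  ring

lemma pvB_list (cs : List Char) :
    (PySem.List.pyRange 3 ((((pvTpos cs).map (fun (n : Nat) => (n : Int))).length : Int)) 4).foldl
      (fun r k => PySem.List.pySetD r
        (PySem.List.pyGetD ((pvTpos cs).map (fun (n : Nat) => (n : Int))) k 0) 'A') cs
    = pvGoA cs 0 := by
  have hlen : ((pvTpos cs).map (fun (n : Nat) => (n : Int))).length = (pvTpos cs).length := by simp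
  have hbody : ∀ (r : List Char),
      ∀ k ∈ PySem.List.pyRange 3 ((((pvTpos cs).map (fun (n : Nat) => (n : Int))).length : Int)) 4,
      PySem.List.pySetD r
        (PySem.List.pyGetD ((pvTpos cs).map (fun (n : Nat) => (n : Int))) k 0) 'A'
        = r.set ((pvTpos cs).getD k.toNat 0) 'A' := by
    intro r k hk
    obtain ⟨h3, hlt, hdvd⟩ := (PySem.List.mem_pyRange_iff_of_pos (by norm_num) k).1 hk
    rw [hlen] at hlt
    have h0 : 0 ≤ k := by omega
    have hklt : k.toNat < (pvTpos cs).length := by omega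
    rw [PySem.List.pyGetD_eq_getElem _ _ h0 (by simp; omega)]
    simp only [List.getElem_map]
    rw [PySem.List.pySetD_natCast]
    congr 1
    exact (List.getD_eq_getElem _ _ hklt).symm
  rw [PySem.List.foldl_congr_mem _ _ _ _ hbody]
  have hfold :
      List.foldl (fun (acc : List Char) (x : Int) => acc.set ((pvTpos cs).getD x.toNat 0) 'A') cs
        (PySem.List.pyRange 3 ((((pvTpos cs).map (fun (n : Nat) => (n : Int))).length : Int)) 4)
      = List.foldl (fun (r : List Char) (i : Nat) => r.set i 'A') cs
        ((PySem.List.pyRange 3 ((((pvTpos cs).map (fun (n : Nat) => (n : Int))).length : Int)) 4).map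
          (fun k : Int => (pvTpos cs).getD k.toNat 0)) :=
    (List.foldl_map (f := fun k : Int => (pvTpos cs).getD k.toNat 0)
      (g := fun (r : List Char) (i : Nat) => r.set i 'A')).symm
  rw [hfold]
  refine List.ext_getElem? fun j => ?_
  rw [pvFoldSet_getElem?]
  have hgo := pvGoA_getElem? cs 0 (by norm_num) j
  simp only [Nat.cast_zero, Nat.zero_add] at hgo
  rw [hgo]
  have hmem : j ∈ (PySem.List.pyRange 3 ((((pvTpos cs).map (fun (n : Nat) => (n : Int))).length : Int)) 4).map
        (fun k => (pvTpos cs).getD k.toNat 0)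
      ↔ (cs[j]? = some 'T' ∧ pvCntT (cs.take j) % 4 = 3) := by
    constructor
    · intro hm
      obtain ⟨k, hk, hgk⟩ := List.mem_map.1 hm
      obtain ⟨h3, hlt, hdvd⟩ := (PySem.List.mem_pyRange_iff_of_pos (by norm_num) k).1 hk
      rw [hlen] at hlt
      have hklt : k.toNat < (pvTpos cs).length := by omega
      have hsome : (pvTpos cs)[k.toNat]? = some j := by
        rw [List.getElem?_eq_getElem hklt, ← hgk]
        exact congrArg some (List.getD_eq_getElem _ 0 hklt).symm
      have h2 := (pvTpos_getElem? cs k.toNat j).1 hsome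
      exact ⟨h2.1, by obtain ⟨_, hc⟩ := h2; omega⟩
    · rintro ⟨hT, hc⟩
      have hsome : (pvTpos cs)[pvCntT (cs.take j)]? = some j :=
        (pvTpos_getElem? cs _ j).2 ⟨hT, rfl⟩
      have hmlt : pvCntT (cs.take j) < (pvTpos cs).length :=
        (List.getElem?_eq_some_iff.1 hsome).1
      refine List.mem_map.2 ⟨((pvCntT (cs.take j) : Nat) : Int), ?_, ?_⟩
      · rw [PySem.List.mem_pyRange_iff_of_pos (by norm_num)]
        refine ⟨by omega, by rw [hlen]; omega, by omega⟩
      · rw [Int.toNat_natCast]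
        rw [List.getD_eq_getElem _ _ hmlt]
        exact (List.getElem?_eq_some_iff.1 hsome).2
  rw [if_congr hmem rfl rfl]
  cases hx : cs[j]? with
  | none => simp
  | some x =>
    by_cases hxT : x = 'T'
    · subst hxT
      by_cases hc : pvCntT (cs.take j) % 4 = 3 <;> simp [hc]
    · simp [hxT]

-- ===== VERDICT (by name: the statement is the Claim_ definition above) =====
theorem remove_terminators_spec : Claim_equal_remove_terminators := by
  intro sequence _
  unfold Spec_remove_terminators remove_terminators remove_terminators_alt
  simp only [pvTs_eq]
  rw [pvB_list]
  rw [pvA_fold]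
  simp
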